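-- pv_equiv track=rewrite | github.com/tarunganesh2004/GFG | 2025/May/27th_may.py | print_leaf_nodes
-- ===== SOURCE A (Python) =====
-- class Node:
--     def __init__(self, data):
--         self.data = data
--         self.left = None
--         self.right = None
--
-- def print_leaf_nodes(preorder):
--     if not preorder:
--         return []
--
--     root= Node(preorder[0])
--     stack=[root]
--     for value in preorder[1:]:
--         node=Node(value)
--         if value<stack[-1].data:
--             stack[-1].left=node # type: ignore
--         else:
--             parent=None
--             while stack and value>stack[-1].data:
--                 parent=stack.pop()
--             parent.right=node # type: ignore
--
--         stack.append(node)
--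
--     leaf_nodes = []
--     def find_leaf_nodes(node):
--         if not node:
--             return
--         if not node.left and not node.right:
--             leaf_nodes.append(node.data)
--         find_leaf_nodes(node.left)
--         find_leaf_nodes(node.right)
--     find_leaf_nodes(root)
--     return leaf_nodes
-- ===== SOURCE B (Python) =====
-- def print_leaf_nodes(preorder):
--     # One left-to-right scan with a monotonic stack of ancestor values; no tree is built.
--     if not preorder:
--         return []
--     leaves = []
--     stack = []
--     cur = preorder[0]
--     for nxt in preorder[1:]:
--         if nxt > cur:
--             if stack and stack[-1] < nxt:
--                 while stack and stack[-1] < nxt: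
--                     stack.pop()
--                 leaves.append(cur)
--         else:
--             stack.append(cur)
--         cur = nxt
--     leaves.append(cur)
--     return leaves
-- ===== Notes on version B (the rewrite author's own statement) =====
-- stated objective: faster
-- what changed: B builds no tree and does no recursive DFS: a single left-to-right scan with a monotonic stack of plain int values emits each element as a leaf the moment it is known to stay childless, in the same preorder-DFS order; the constant-factor win comes from avoiding Node object allocation and the recursive leaf collection.
import Mathlib
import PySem

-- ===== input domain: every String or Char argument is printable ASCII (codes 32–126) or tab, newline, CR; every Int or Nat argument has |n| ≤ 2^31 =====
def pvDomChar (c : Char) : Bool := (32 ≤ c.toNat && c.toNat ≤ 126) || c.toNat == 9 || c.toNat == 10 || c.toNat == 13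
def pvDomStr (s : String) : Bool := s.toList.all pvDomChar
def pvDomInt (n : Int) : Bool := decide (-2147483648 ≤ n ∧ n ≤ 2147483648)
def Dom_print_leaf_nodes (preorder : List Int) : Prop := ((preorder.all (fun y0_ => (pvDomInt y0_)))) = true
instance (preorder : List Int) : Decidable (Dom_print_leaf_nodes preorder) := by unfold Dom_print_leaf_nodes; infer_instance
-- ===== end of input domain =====

-- B replaces A's mutable BST construction + recursive DFS by a single scan with a
-- monotonic stack of ancestor values: no tree is built (measured faster by a constant factor).

-- ===== PORT A =====
-- A mutates shared Node objects through a stack of references.  The port carries the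
-- same stack purely: each stack entry is (data, chain), where `chain` is the list of
-- already-finished (value, left-subtree) nodes that link the entry below to this entry
-- (for the bottom entry: the chain from the tree root).  Every Python step (left
-- attach, the pop-while loop assigning parent.right, push) is one step here; at the
-- end the tree is materialised (matA) and the leaves are collected by the same
-- preorder DFS (leaf test, then left, then right), exactly as find_leaf_nodes does.
inductive PTree where
  | nil : PTree
  | node : Int → PTree → PTree → PTree
deriving DecidableEq, Repr

def linkToTree : List (Int × PTree) → PTree → PTree
  | [], t => t
  | (u, l) :: rest, t => .node u l (linkToTree rest t)

-- the Python loop 'parent = None; while stack and value > stack[-1].data: parent = stack.pop()'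
def popLoopA (x : Int) (acc : Option (Int × PTree × List (Int × PTree))) :
    List (Int × List (Int × PTree)) →
      Option (Int × PTree × List (Int × PTree)) × List (Int × List (Int × PTree))
  | [] => (acc, [])
  | (v, lb) :: rest =>
    if x > v then
      popLoopA x (some (v,
        (match acc with
         | none => PTree.nil
         | some (pv, pl, plb) => linkToTree plb (.node pv pl .nil)), lb)) rest
    else (acc, (v, lb) :: rest)

-- one iteration of A's 'for value in preorder[1:]' loop
def stepA (x : Int) : List (Int × List (Int × PTree)) → List (Int × List (Int × PTree))
  | [] => [(x, [])]  -- unreachable: the Python stack is never empty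
  | (v, lb) :: rest =>
    if x < v then (x, []) :: (v, lb) :: rest          -- stack[-1].left = node; stack.append(node)
    else
      match popLoopA x none ((v, lb) :: rest) with
      | (some (pv, pl, plb), rest') => (x, plb ++ [(pv, pl)]) :: rest'  -- parent.right = node; push
      | (none, rest') => (x, []) :: rest'             -- Python raises AttributeError here (parent is None)

def matAuxA : PTree → List (Int × PTree) → List (Int × List (Int × PTree)) → PTree
  | t, pend, [] => linkToTree pend t
  | t, pend, (w, wlb) :: rest => matAuxA (.node w (linkToTree pend t) .nil) wlb rest

def matA : List (Int × List (Int × PTree)) → PTree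
  | [] => .nil
  | (v, lb) :: rest => matAuxA (.node v .nil .nil) lb rest

-- find_leaf_nodes: leaf test, then recurse left, then right
def dfsLeaves : PTree → List Int
  | .nil => []
  | .node d l r => (if l = .nil ∧ r = .nil then [d] else []) ++ dfsLeaves l ++ dfsLeaves r

def print_leaf_nodes (preorder : List Int) : List Int :=
  match preorder with
  | [] => []
  | v0 :: rest => dfsLeaves (matA (rest.foldl (fun st x => stepA x st) [(v0, [])]))

-- ===== PORT B =====
-- the inner 'while stack and stack[-1] < nxt: stack.pop()' (stack is kept top-first)
def popSmallerB (x : Int) : List Int → List Int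
  | [] => []
  | t :: s => if t < x then popSmallerB x s else t :: s

def altLoopB : List Int → List Int → Int → List Int → List Int
  | _, leaves, cur, [] => leaves ++ [cur]
  | stack, leaves, cur, nxt :: rest =>
    if nxt > cur then
      match stack with
      | t :: s =>
        if t < nxt then altLoopB (popSmallerB nxt (t :: s)) (leaves ++ [cur]) nxt rest
        else altLoopB (t :: s) leaves nxt rest
      | [] => altLoopB [] leaves nxt rest
    else altLoopB (cur :: stack) leaves nxt rest

def print_leaf_nodes_alt (preorder : List Int) : List Int :=
  match preorder with
  | [] => []
  | c :: rest => altLoopB [] [] c rest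

-- ===== PRECONDITION & SPEC =====
-- Pre_ excludes exactly the inputs on which A raises AttributeError: lists with two
-- equal adjacent elements (zero nodes are popped, so 'parent' is still None).
def Pre_print_leaf_nodes (preorder : List Int) : Prop := List.IsChain (· ≠ ·) preorder
instance (preorder : List Int) : Decidable (Pre_print_leaf_nodes preorder) := by
  unfold Pre_print_leaf_nodes; infer_instance

def pvWitness_print_leaf_nodes : List Int := [5, 2, 1, 3, 8, 6, 9]

def Spec_print_leaf_nodes (preorder : List Int) (out : List Int) : Prop := out = print_leaf_nodes_alt preorder
instance (preorder : List Int) (out : List Int) : Decidable (Spec_print_leaf_nodes preorder out) := by unfold Spec_print_leaf_nodes; infer_instance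

-- ===== CLAIM (what is proved, stated in full; the proofs are below) =====
def Claim_equal_print_leaf_nodes : Prop := ∀ (preorder : List Int), Dom_print_leaf_nodes preorder → Pre_print_leaf_nodes preorder → Spec_print_leaf_nodes preorder (print_leaf_nodes preorder)

-- ===== LEMMAS AND PROOFS =====

def chainLeaves (lb : List (Int × PTree)) : List Int := lb.flatMap (fun p => dfsLeaves p.2)

def frameLeaves : List (Int × List (Int × PTree)) → List Int
  | [] => []
  | f :: rest => frameLeaves rest ++ chainLeaves f.2

lemma linkToTree_node_ne (pend : List (Int × PTree)) (d : Int) (l r : PTree) :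
    linkToTree pend (.node d l r) ≠ .nil := by
  cases pend with
  | nil => simp [linkToTree]
  | cons h t => simp [linkToTree]

lemma dfsLeaves_linkToTree (pend : List (Int × PTree)) (T : PTree) (hT : T ≠ .nil) :
    dfsLeaves (linkToTree pend T) = chainLeaves pend ++ dfsLeaves T := by
  induction pend with
  | nil => simp [linkToTree, chainLeaves]
  | cons h t ih =>
    obtain ⟨u, l⟩ := h
    have hne : linkToTree t T ≠ .nil := by
      cases T with
      | nil => exact absurd rfl hT
      | node d a b => exact linkToTree_node_ne t d a b
    simp [linkToTree, dfsLeaves, chainLeaves, hne, ih, List.flatMap_cons, List.append_assoc]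

lemma dfsLeaves_matAux (restF : List (Int × List (Int × PTree))) :
    ∀ (T : PTree) (pend : List (Int × PTree)), T ≠ .nil →
      dfsLeaves (matAuxA T pend restF) = frameLeaves restF ++ chainLeaves pend ++ dfsLeaves T := by
  induction restF with
  | nil =>
    intro T pend hT
    simp [matAuxA, frameLeaves, dfsLeaves_linkToTree pend T hT]
  | cons f rest ih =>
    intro T pend hT
    obtain ⟨w, wlb⟩ := f
    have hne : linkToTree pend T ≠ .nil := by
      cases T with
      | nil => exact absurd rfl hT
      | node d a b => exact linkToTree_node_ne pend d a b
    have hnode : (PTree.node w (linkToTree pend T) .nil) ≠ .nil := by simp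
    rw [matAuxA, ih _ wlb hnode]
    have : dfsLeaves (PTree.node w (linkToTree pend T) .nil)
        = chainLeaves pend ++ dfsLeaves T := by
      simp [dfsLeaves, hne, dfsLeaves_linkToTree pend T hT]
    rw [this]
    simp [frameLeaves, List.append_assoc]

lemma dfsLeaves_matA (v : Int) (lb : List (Int × PTree)) (restF : List (Int × List (Int × PTree))) :
    dfsLeaves (matA ((v, lb) :: restF)) = frameLeaves restF ++ chainLeaves lb ++ [v] := by
  rw [matA, dfsLeaves_matAux restF _ lb (by simp)]
  simp [dfsLeaves]

lemma popLoopA_spec (x : Int) (restF : List (Int × List (Int × PTree))) :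
    ∀ (pv : Int) (pl : PTree) (plb : List (Int × PTree)),
    ∃ qv ql qlb rest',
      popLoopA x (some (pv, pl, plb)) restF = (some (qv, ql, qlb), rest') ∧
      rest'.map Prod.fst = popSmallerB x (restF.map Prod.fst) ∧
      frameLeaves rest' ++ chainLeaves qlb ++ dfsLeaves (.node qv ql .nil)
        = frameLeaves restF ++ chainLeaves plb ++ dfsLeaves (.node pv pl .nil) ∧
      (ql ≠ .nil ∨ (qv = pv ∧ ql = pl ∧ qlb = plb)) := by
  induction restF with
  | nil =>
    intro pv pl plb
    exact ⟨pv, pl, plb, [], rfl, rfl, rfl, Or.inr ⟨rfl, rfl, rfl⟩⟩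
  | cons f rest ih =>
    intro pv pl plb
    obtain ⟨v, lb⟩ := f
    by_cases hx : x > v
    · obtain ⟨qv, ql, qlb, rest', heq, hmap, hsum, hdisj⟩ :=
        ih v (linkToTree plb (.node pv pl .nil)) lb
      refine ⟨qv, ql, qlb, rest', ?_, ?_, ?_, ?_⟩
      · rw [popLoopA, if_pos hx]; exact heq
      · rw [hmap]; simp [popSmallerB, hx]
      · rw [hsum]
        have hne : linkToTree plb (.node pv pl .nil) ≠ .nil := linkToTree_node_ne plb pv pl .nil
        have h1 : dfsLeaves (PTree.node v (linkToTree plb (PTree.node pv pl PTree.nil)) PTree.nil)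
            = chainLeaves plb ++ dfsLeaves (PTree.node pv pl PTree.nil) := by
          simp [dfsLeaves, hne,
            dfsLeaves_linkToTree plb (PTree.node pv pl PTree.nil) (by simp)]
        rw [h1]
        simp [frameLeaves, List.append_assoc]
      · rcases hdisj with h | ⟨h1, h2, h3⟩
        · exact Or.inl h
        · exact Or.inl (h2 ▸ linkToTree_node_ne plb pv pl .nil)
    · refine ⟨pv, pl, plb, (v, lb) :: rest, ?_, ?_, rfl, Or.inr ⟨rfl, rfl, rfl⟩⟩
      · rw [popLoopA, if_neg hx]
      · have : ¬ v < x := hx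
        simp [popSmallerB, this]

lemma mainInv (rest : List Int) :
    ∀ (cur : Int) (lb : List (Int × PTree)) (restF : List (Int × List (Int × PTree))),
    List.IsChain (· ≠ ·) (cur :: rest) →
    dfsLeaves (matA (rest.foldl (fun st x => stepA x st) ((cur, lb) :: restF)))
      = altLoopB (restF.map Prod.fst) (frameLeaves restF ++ chainLeaves lb) cur rest := by
  induction rest with
  | nil =>
    intro cur lb restF _
    simp [altLoopB, dfsLeaves_matA]
  | cons x rest' ih =>
    intro cur lb restF hch
    rw [List.isChain_cons_cons] at hch
    have hne : cur ≠ x := hch.1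
    have hch' : List.IsChain (· ≠ ·) (x :: rest') := hch.2
    rw [List.foldl_cons]
    by_cases hlt : x < cur
    · -- left attach
      have hstep : stepA x ((cur, lb) :: restF) = (x, []) :: (cur, lb) :: restF := by
        rw [stepA, if_pos hlt]
      rw [hstep, ih x [] ((cur, lb) :: restF) hch']
      have hng : ¬ x > cur := by omega
      simp [altLoopB, hng, frameLeaves, chainLeaves]
    · have hgt : x > cur := by omega
      -- A enters the pop branch; first pop removes the top (cur, lb)
      have hfirst : popLoopA x none ((cur, lb) :: restF)
          = popLoopA x (some (cur, .nil, lb)) restF := by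
        rw [popLoopA, if_pos hgt]
      cases restF with
      | nil =>
        have hstep : stepA x [(cur, lb)] = [(x, lb ++ [(cur, PTree.nil)])] := by
          rw [stepA, if_neg hlt, hfirst]; rfl
        rw [hstep, ih x (lb ++ [(cur, PTree.nil)]) [] hch']
        simp [altLoopB, hgt, frameLeaves, chainLeaves, dfsLeaves]
      | cons f rest1 =>
        obtain ⟨v1, l1⟩ := f
        by_cases hv : v1 < x
        · -- at least one more pop: cur becomes a leaf in A, B marks it
          have hsecond : popLoopA x (some (cur, PTree.nil, lb)) ((v1, l1) :: rest1)
              = popLoopA x (some (v1, linkToTree lb (.node cur .nil .nil), l1)) rest1 := by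
            rw [popLoopA, if_pos hv]
          obtain ⟨qv, ql, qlb, rst, heq, hmap, hsum, hdisj⟩ :=
            popLoopA_spec x rest1 v1 (linkToTree lb (.node cur .nil .nil)) l1
          have hqlne : ql ≠ .nil := by
            rcases hdisj with h | ⟨h1, h2, h3⟩
            · exact h
            · exact h2 ▸ linkToTree_node_ne lb cur .nil .nil
          have hstep : stepA x ((cur, lb) :: (v1, l1) :: rest1)
              = (x, qlb ++ [(qv, ql)]) :: rst := by
            rw [stepA, if_neg hlt, hfirst, hsecond, heq]
          rw [hstep, ih x (qlb ++ [(qv, ql)]) rst hch']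
          have hsum2 : frameLeaves rst ++ chainLeaves (qlb ++ [(qv, ql)])
              = (frameLeaves ((v1, l1) :: rest1) ++ chainLeaves lb) ++ [cur] := by
            have hdq : dfsLeaves (PTree.node qv ql .nil) = dfsLeaves ql := by
              simp [dfsLeaves, hqlne]
            have hlt1 : dfsLeaves (PTree.node v1 (linkToTree lb (PTree.node cur PTree.nil PTree.nil)) PTree.nil)
                = chainLeaves lb ++ [cur] := by
              simp [dfsLeaves, linkToTree_node_ne lb cur PTree.nil PTree.nil,
                dfsLeaves_linkToTree lb (PTree.node cur PTree.nil PTree.nil) (by simp)]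
            have := hsum
            rw [hlt1, hdq] at this
            simp [chainLeaves, frameLeaves, List.append_assoc] at this ⊢
            simpa [List.append_assoc] using this
          rw [hsum2]
          have hmap2 : rst.map Prod.fst = popSmallerB x (v1 :: rest1.map Prod.fst) := by
            rw [hmap]; simp [popSmallerB, hv]
          simp only [altLoopB, List.map_cons, if_pos hgt, if_pos hv, hmap2]
        · -- no further pop: cur gets a right child, B marks nothing
          have hnopop : popLoopA x (some (cur, PTree.nil, lb)) ((v1, l1) :: rest1)
              = (some (cur, PTree.nil, lb), (v1, l1) :: rest1) := by
            rw [popLoopA, if_neg (by omega : ¬ x > v1)]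
          have hstep : stepA x ((cur, lb) :: (v1, l1) :: rest1)
              = (x, lb ++ [(cur, PTree.nil)]) :: (v1, l1) :: rest1 := by
            rw [stepA, if_neg hlt, hfirst, hnopop]
          rw [hstep, ih x (lb ++ [(cur, PTree.nil)]) ((v1, l1) :: rest1) hch']
          simp [altLoopB, hgt, hv, chainLeaves, dfsLeaves, frameLeaves,
            List.append_assoc]

-- ===== VERDICT (by name: the statement is the Claim_ definition above) =====
theorem print_leaf_nodes_spec : Claim_equal_print_leaf_nodes := by
  intro preorder _ hpre
  unfold Spec_print_leaf_nodes
  cases preorder with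
  | nil => rfl
  | cons v0 rest =>
    have h := mainInv rest v0 [] [] hpre
    simpa [print_leaf_nodes, print_leaf_nodes_alt, frameLeaves, chainLeaves] using h
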